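-- pv_equiv track=rewrite | github.com/bankaraju/askanka.com | pipeline/spread_statistics.py | _get_common_dates
-- ===== SOURCE A (Python) =====
-- def _get_common_dates(prices: dict) -> list:
--     """Return sorted list of dates present in ALL price series."""
--     if not prices:
--         return []
--     date_sets = [set(v.keys()) for v in prices.values()]
--     common = date_sets[0]
--     for s in date_sets[1:]:
--         common &= s
--     return sorted(common)
-- ===== SOURCE B (Python) =====
-- def _get_common_dates(prices: dict) -> list:
--     """Return sorted list of dates present in ALL price series."""
--     n = len(prices)
--     counts = {}
--     for series in prices.values():
--         for date in series:
--             counts[date] = counts.get(date, 0) + 1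
--     return sorted(date for date, c in counts.items() if c == n)
-- ===== Notes on version B (the rewrite author's own statement) =====
-- stated objective: alternative
-- what changed: Replaces the build-k-sets-then-pairwise-&= intersection reduction by a single flat count-and-threshold pass: one dict counts in how many series each date occurs, and the dates whose count equals len(prices) are sorted and returned.
import Mathlib
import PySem

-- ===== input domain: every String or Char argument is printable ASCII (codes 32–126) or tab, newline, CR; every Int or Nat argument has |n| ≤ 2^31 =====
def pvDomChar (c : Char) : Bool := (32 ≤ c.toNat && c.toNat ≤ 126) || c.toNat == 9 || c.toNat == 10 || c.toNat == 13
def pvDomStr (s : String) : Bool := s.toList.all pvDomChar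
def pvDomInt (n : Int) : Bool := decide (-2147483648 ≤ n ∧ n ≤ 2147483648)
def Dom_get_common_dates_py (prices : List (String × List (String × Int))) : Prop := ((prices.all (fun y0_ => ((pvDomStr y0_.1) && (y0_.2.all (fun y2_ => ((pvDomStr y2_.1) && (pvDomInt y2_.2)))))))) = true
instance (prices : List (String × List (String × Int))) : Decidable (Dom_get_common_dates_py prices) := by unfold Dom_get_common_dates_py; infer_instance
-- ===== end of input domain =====

-- B replaces A's pairwise set-intersection reduction by one flat date→count pass
-- with a count == len(prices) threshold (alternative decomposition, same cost).


-- ===== PORT A =====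
-- prices is a Python dict[str, dict[str, int]]: modelled with PySem.Dict.ofList.
def get_common_dates_py (prices : List (String × List (String × Int))) : List String :=
  if prices = [] then []
  else
    let date_sets : List (PySem.Set String) :=
      (PySem.Dict.ofList prices).values.map
        (fun v => PySem.Set.ofList (PySem.Dict.ofList v).keys)
    match date_sets with
    | [] => []   -- unreachable: prices ≠ [] gives a nonempty dict, hence nonempty values
    | first :: rest =>
        PySem.List.sorted (rest.foldl (fun common s => PySem.Set.inter common s) first)
          (fun x => x)

-- ===== PORT B =====
def get_common_dates_py_alt (prices : List (String × List (String × Int))) : List String :=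
  let d := PySem.Dict.ofList prices
  let n : Int := d.size
  let counts : PySem.Dict String Int :=
    d.values.foldl
      (fun counts series =>
        (PySem.Dict.ofList series).keys.foldl
          (fun counts date => counts.modify date 0 (fun c => c + 1)) counts)
      PySem.Dict.empty
  PySem.List.sorted ((counts.items.filter (fun p => p.2 == n)).map (fun p => p.1))
    (fun x => x)

-- ===== PRECONDITION & SPEC =====
def Spec_get_common_dates_py (prices : List (String × List (String × Int))) (out : List String) : Prop := out = get_common_dates_py_alt prices
instance (prices : List (String × List (String × Int))) (out : List String) : Decidable (Spec_get_common_dates_py prices out) := by unfold Spec_get_common_dates_py; infer_instance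

-- ===== CLAIM (what is proved, stated in full; the proofs are below) =====
def Claim_equal_get_common_dates_py : Prop := ∀ (prices : List (String × List (String × Int))), Dom_get_common_dates_py prices → Spec_get_common_dates_py prices (get_common_dates_py prices)

-- ===== LEMMAS AND PROOFS =====

-- membership in A's fold of intersections
theorem pv_mem_foldl_inter (rest : List (PySem.Set String)) (c : PySem.Set String) (x : String) :
    x ∈ rest.foldl (fun common s => PySem.Set.inter common s) c ↔ x ∈ c ∧ ∀ s ∈ rest, x ∈ s := by
  induction rest generalizing c with
  | nil => simp
  | cons s rest ih =>
      simp [List.foldl_cons, ih, PySem.Set.mem_inter, and_assoc]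

theorem pv_nodup_foldl_inter (rest : List (PySem.Set String)) (c : PySem.Set String)
    (h : c.Nodup) : (rest.foldl (fun common s => PySem.Set.inter common s) c).Nodup := by
  induction rest generalizing c with
  | nil => exact h
  | cons s rest ih => exact ih _ (PySem.Set.nodup_inter c s h)

-- the value of B's nested counting fold
theorem pv_counts_getD (lss : List (List String)) (c : PySem.Dict String Int) (dt : String) :
    (lss.foldl (fun counts l =>
        l.foldl (fun counts date => counts.modify date 0 (fun c => c + 1)) counts) c).getD dt 0
      = c.getD dt 0 + ((lss.map (fun l => List.count dt l)).sum : Nat) := by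
  induction lss generalizing c with
  | nil => simp
  | cons l lss ih =>
      simp only [List.foldl_cons, ih, PySem.Dict.getD_foldl_modify_add_one, List.map_cons,
        List.sum_cons]
      push_cast; ring

theorem pv_counts_nodup_keys (lss : List (List String)) (c : PySem.Dict String Int)
    (h : c.keys.Nodup) :
    (lss.foldl (fun counts l =>
        l.foldl (fun counts date => counts.modify date 0 (fun c => c + 1)) counts) c).keys.Nodup := by
  induction lss generalizing c with
  | nil => exact h
  | cons l lss ih =>
      exact ih _ (PySem.Dict.nodup_keys_foldl_modify_key l (fun x => x) 0
        (fun _ _ => fun v => v + 1) c h)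

theorem pv_sum_map_le_length (l : List (List (String × Int))) (f : List (String × Int) → Nat)
    (h : ∀ v ∈ l, f v ≤ 1) : (l.map f).sum ≤ l.length := by
  induction l with
  | nil => simp
  | cons a l ih =>
      have := h a (by simp)
      have := ih (fun v hv => h v (by simp [hv]))
      simp only [List.map_cons, List.sum_cons, List.length_cons]
      omega

theorem pv_sum_map_eq_length_iff (l : List (List (String × Int))) (f : List (String × Int) → Nat)
    (h : ∀ v ∈ l, f v ≤ 1) : (l.map f).sum = l.length ↔ ∀ v ∈ l, f v = 1 := by
  induction l with
  | nil => simp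
  | cons a l ih =>
      have h1 := h a (by simp)
      have h2 : ∀ v ∈ l, f v ≤ 1 := fun v hv => h v (by simp [hv])
      have h3 := pv_sum_map_le_length l f h2
      simp only [List.map_cons, List.sum_cons, List.length_cons, List.mem_cons]
      constructor
      · intro he
        have hall : (l.map f).sum = l.length ∧ f a = 1 := by omega
        intro v hv
        rcases hv with rfl | hv
        · exact hall.2
        · exact (ih h2).1 hall.1 v hv
      · intro hall
        have ha : f a = 1 := hall a (Or.inl rfl)
        have : (l.map f).sum = l.length := (ih h2).2 (fun v hv => hall v (Or.inr hv))
        omega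

-- ===== VERDICT (by name: the statement is the Claim_ definition above) =====
theorem get_common_dates_py_spec : Claim_equal_get_common_dates_py := by
  intro prices _
  unfold Spec_get_common_dates_py get_common_dates_py get_common_dates_py_alt
  by_cases hp : prices = []
  · subst hp; rfl
  · simp only [hp, ite_false]
    -- keys of the outer dict
    have hkeys : (PySem.Dict.ofList prices).keys = PySem.Set.ofList (prices.map Prod.fst) := by
      show (List.foldl (fun acc p => acc.insert p.1 p.2) PySem.Dict.empty prices).keys = _
      rw [PySem.Dict.keys_foldl_insert_key prices Prod.fst (fun _ p => p.2) PySem.Dict.empty]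
      exact PySem.Set.update_empty _
    -- the dict of a nonempty assoc list has nonempty values
    have hvlen : (PySem.Dict.ofList prices).values.length = (PySem.Dict.ofList prices).keys.length := by
      simp [PySem.Dict.values, PySem.Dict.keys]
    have hvne : (PySem.Dict.ofList prices).values ≠ [] := by
      obtain ⟨q, qs, rfl⟩ := List.exists_cons_of_ne_nil hp
      intro hnil
      have : (PySem.Dict.ofList (q :: qs)).keys.length = 0 := by rw [← hvlen, hnil]; rfl
      rw [hkeys] at this
      simp [PySem.Set.ofList_cons] at this
    obtain ⟨first, restv, hval⟩ := List.exists_cons_of_ne_nil hvne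
    rw [hval]
    simp only [List.map_cons]
    have hsize : (PySem.Dict.ofList prices).size = restv.length + 1 := by
      have h1 : (PySem.Dict.ofList prices).size = (PySem.Dict.ofList prices).values.length := by
        simp [PySem.Dict.size, PySem.Dict.values]
      rw [h1, hval]; rfl
    -- B's counting fold, rewritten as a fold over the lists of keys
    have hfold : (List.foldl
          (fun counts series =>
            List.foldl (fun counts date => counts.modify date 0 fun c => c + 1) counts
              (PySem.Dict.ofList series).keys)
          (PySem.Dict.empty : PySem.Dict String Int) (first :: restv))
        = ((first :: restv).map (fun v => (PySem.Dict.ofList v).keys)).foldl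
            (fun counts l =>
              l.foldl (fun counts date => counts.modify date 0 fun c => c + 1) counts)
            (PySem.Dict.empty : PySem.Dict String Int) := by
      rw [List.foldl_map]
    rw [hfold]
    set cfold := ((first :: restv).map (fun v => (PySem.Dict.ofList v).keys)).foldl
            (fun counts l =>
              l.foldl (fun counts date => counts.modify date 0 fun c => c + 1) counts)
            (PySem.Dict.empty : PySem.Dict String Int) with hcf
    have hnodk : cfold.keys.Nodup := by
      rw [hcf]
      exact pv_counts_nodup_keys _ _ PySem.Dict.nodup_keys_empty
    have hgetD : ∀ x : String, cfold.getD x 0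
        = (((first :: restv).map (fun v => List.count x (PySem.Dict.ofList v).keys)).sum : Nat) := by
      intro x
      rw [hcf, pv_counts_getD]
      simp [List.map_map, Function.comp_def]
    apply PySem.List.sorted_eq_sorted_of_perm _ _ _ (fun a b h => h)
    rw [List.perm_ext_iff_of_nodup]
    · intro x
      rw [pv_mem_foldl_inter]
      have hle : ∀ v : List (String × Int), List.count x (PySem.Dict.ofList v).keys ≤ 1 :=
        fun v => List.nodup_iff_count_le_one.mp (PySem.Dict.nodup_keys_ofList v) x
      have hcnt : ∀ v : List (String × Int),
          (List.count x (PySem.Dict.ofList v).keys = 1 ↔ x ∈ (PySem.Dict.ofList v).keys) := by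
        intro v
        constructor
        · intro h1; exact List.count_pos_iff.mp (by omega)
        · intro hm; have := List.count_pos_iff.mpr hm; have := hle v; omega
      have hmemB : x ∈ List.map (fun p => p.1)
            (List.filter (fun p => p.2 == (↑(PySem.Dict.ofList prices).size : Int)) cfold.items)
          ↔ cfold.get? x = some ((PySem.Dict.ofList prices).size : Int) := by
        simp only [List.mem_map, List.mem_filter, beq_iff_eq]
        constructor
        · rintro ⟨⟨a, b⟩, ⟨hmem, hb⟩, hfst⟩
          simp only at hb hfst
          subst hb; subst hfst
          exact (PySem.Dict.get?_eq_some_iff_mem_items cfold a _ hnodk).mpr hmem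
        · intro h
          exact ⟨(x, _), ⟨(PySem.Dict.get?_eq_some_iff_mem_items cfold x _ hnodk).mp h, rfl⟩, rfl⟩
      rw [hmemB]
      have hne : ((PySem.Dict.ofList prices).size : Int) ≠ 0 := by rw [hsize]; positivity
      have hget_iff : cfold.get? x = some ((PySem.Dict.ofList prices).size : Int)
          ↔ cfold.getD x 0 = ((PySem.Dict.ofList prices).size : Int) := by
        constructor
        · intro h; exact PySem.Dict.getD_of_get?_eq_some cfold 0 h
        · intro h
          cases hx : cfold.get? x with
          | none => exact absurd (PySem.Dict.getD_of_get?_eq_none cfold 0 hx ▸ h).symm hne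
          | some v =>
              rw [PySem.Dict.getD_of_get?_eq_some cfold 0 hx] at h
              rw [h]
      rw [hget_iff, hgetD, hsize]
      rw [show ((restv.length + 1 : Nat) : Int) = (((first :: restv).length : Nat) : Int) by simp]
      rw [Nat.cast_inj]
      rw [pv_sum_map_eq_length_iff _ _ (fun v _ => hle v)]
      simp only [List.mem_cons, PySem.Set.mem_ofList, List.mem_map]
      constructor
      · rintro ⟨h1, h2⟩ v hv
        rcases hv with rfl | hv
        · exact (hcnt v).mpr h1
        · exact (hcnt v).mpr ((PySem.Set.mem_ofList _ _).mp (h2 _ ⟨v, hv, rfl⟩))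
      · intro h
        refine ⟨(hcnt first).mp (h first (Or.inl rfl)), ?_⟩
        rintro s ⟨v, hv, rfl⟩
        exact (PySem.Set.mem_ofList _ _).mpr ((hcnt v).mp (h v (Or.inr hv)))
    · exact pv_nodup_foldl_inter _ _ (PySem.Set.nodup_ofList _)
    · exact List.Nodup.sublist (List.Sublist.map _ List.filter_sublist) hnodk
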